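-- pv_equiv track=rewrite | github.com/Park-min-hyoung/CodingTest | 프로그래머스/Lv2/n^2 배열 자르기.py | solution
-- ===== SOURCE A (Python) =====
-- def solution(n, left, right):
--     result = []
--     for number in range(left, right + 1):
--         row = number // n + 1
--         col = number % n + 1
--
--         if row >= col: result.append(row)
--         else: result.append(col)
--
--     return result
-- ===== SOURCE B (Python) =====
-- def solution(n, left, right):
--     result = []
--     start_row = left // n
--     end_row = right // n
--     for row in range(start_row, end_row + 1):
--         col_start = left % n if row == start_row else 0
--         col_end = right % n if row == end_row else n - 1
--         for col in range(col_start, col_end + 1):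
--             result.append(max(row, col) + 1)
--     return result
-- ===== Notes on version B (the rewrite author's own statement) =====
-- stated objective: alternative
-- what changed: B decomposes the flat index range into rows of the conceptual n-by-n grid (start_row=left//n .. end_row=right//n) and nested-loops over each row's column range, appending max(row,col)+1, instead of A's single flat loop computing row/col from each index.
-- outside the precondition, e.g. on solution(-2, 0, 3): A returns [1, 0, 1, 0], B returns []
import Mathlib
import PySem

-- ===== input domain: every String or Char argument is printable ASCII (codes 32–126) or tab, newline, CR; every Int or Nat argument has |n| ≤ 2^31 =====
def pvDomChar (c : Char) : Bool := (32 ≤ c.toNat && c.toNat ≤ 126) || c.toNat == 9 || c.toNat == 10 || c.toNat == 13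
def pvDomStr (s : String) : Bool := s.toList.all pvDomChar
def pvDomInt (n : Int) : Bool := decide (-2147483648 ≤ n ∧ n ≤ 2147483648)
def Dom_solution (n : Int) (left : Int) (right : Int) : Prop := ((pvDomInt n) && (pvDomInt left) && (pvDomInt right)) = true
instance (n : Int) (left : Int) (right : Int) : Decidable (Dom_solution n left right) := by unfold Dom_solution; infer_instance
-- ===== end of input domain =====

-- B re-traverses the slice as rows of the conceptual n×n grid (nested row/column loops)
-- instead of A's single flat index loop; same cost, different decomposition.


-- ===== PORT A =====
def solution (n : Int) (left : Int) (right : Int) : List Int :=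
  (PySem.List.pyRange left (right + 1) 1).foldl
    (fun result number =>
      let row := PySem.Int.floordiv number n + 1
      let col := PySem.Int.mod number n + 1
      if row ≥ col then result ++ [row] else result ++ [col])
    []

-- ===== PORT B =====
def solution_alt (n : Int) (left : Int) (right : Int) : List Int :=
  let startRow := PySem.Int.floordiv left n
  let endRow := PySem.Int.floordiv right n
  (PySem.List.pyRange startRow (endRow + 1) 1).foldl
    (fun result row =>
      let colStart := if row = startRow then PySem.Int.mod left n else 0
      let colEnd := if row = endRow then PySem.Int.mod right n else n - 1
      (PySem.List.pyRange colStart (colEnd + 1) 1).foldl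
        (fun result col => result ++ [max row col + 1]) result)
    []

-- ===== PRECONDITION & SPEC =====
-- Pre_ restricts to the problem's natural domain n ≥ 1: A raises ZeroDivisionError at n = 0,
-- and for n < 0 (no n×n grid exists) A returns accidental floor-division values while B returns [].
def Pre_solution (n : Int) (left : Int) (right : Int) : Prop := 1 ≤ n
instance (n : Int) (left : Int) (right : Int) : Decidable (Pre_solution n left right) := by unfold Pre_solution; infer_instance
def pvWitness_solution : Int × Int × Int := (3, 2, 7)
def Spec_solution (n : Int) (left : Int) (right : Int) (out : List Int) : Prop := out = solution_alt n left right
instance (n : Int) (left : Int) (right : Int) (out : List Int) : Decidable (Spec_solution n left right out) := by unfold Spec_solution; infer_instance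

-- ===== CLAIM (what is proved, stated in full; the proofs are below) =====
def Claim_equal_solution : Prop := ∀ (n : Int) (left : Int) (right : Int), Dom_solution n left right → Pre_solution n left right → Spec_solution n left right (solution n left right)

-- ===== LEMMAS AND PROOFS =====

-- fd (q*n + c) = q and md (q*n + c) = c for 0 ≤ c < n
theorem pv_decomp (n q c : Int) (hn : 0 < n) (hc : 0 ≤ c) (hcn : c < n) :
    PySem.Int.floordiv (q * n + c) n = q ∧ PySem.Int.mod (q * n + c) n = c := by
  have hfd : PySem.Int.floordiv (q * n + c) n = q := by
    rw [PySem.Int.floordiv_eq_iff_of_pos hn]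
    constructor
    · omega
    · have : (q + 1) * n = q * n + n := by ring
      omega
  refine ⟨hfd, ?_⟩
  have h := PySem.Int.floordiv_mul_add_mod (q * n + c) n
  rw [hfd] at h
  omega

-- one full or partial row of the flat range
theorem pv_rowchunk (F : Int → Int → Int) (n q c d a b : Int) (hn : 0 < n)
    (hc : 0 ≤ c) (hd : d ≤ n) (ha : a = q * n + c) (hb : b = q * n + d) :
    (PySem.List.pyRange a b 1).map
        (fun k => F (PySem.Int.floordiv k n) (PySem.Int.mod k n))
      = (PySem.List.pyRange c d 1).map (fun col => F q col) := by
  subst ha hb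
  rw [PySem.List.pyRange_one, PySem.List.pyRange_one]
  have ht : (q * n + d - (q * n + c)).toNat = (d - c).toNat := by omega
  rw [ht, List.map_map, List.map_map]
  apply List.map_congr_left
  intro k hk
  simp only [List.mem_range] at hk
  simp only [Function.comp]
  have hck : c + (k : Int) < d := by omega
  have hrw : q * n + c + (k : Int) = q * n + (c + k) := by ring
  rw [hrw]
  obtain ⟨h1, h2⟩ := pv_decomp n q (c + k) hn (by omega) (by omega)
  rw [h1, h2]

-- flat range = rows, by induction on the number of rows
theorem pv_split (F : Int → Int → Int) (n : Int) (hn : 0 < n) :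
    ∀ (t : Nat) (l r : Int),
      PySem.Int.floordiv r n - PySem.Int.floordiv l n = (t : Int) →
      (PySem.List.pyRange l (r + 1) 1).map
          (fun k => F (PySem.Int.floordiv k n) (PySem.Int.mod k n))
        = (PySem.List.pyRange (PySem.Int.floordiv l n) (PySem.Int.floordiv r n + 1) 1).flatMap
            (fun row =>
              (PySem.List.pyRange
                  (if row = PySem.Int.floordiv l n then PySem.Int.mod l n else 0)
                  ((if row = PySem.Int.floordiv r n then PySem.Int.mod r n else n - 1) + 1) 1).map
                (fun col => F row col)) := by
  intro t
  induction t with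
  | zero =>
    intro l r h
    have hsr : PySem.Int.floordiv r n = PySem.Int.floordiv l n := by omega
    have hl := PySem.Int.floordiv_mul_add_mod l n
    have hr := PySem.Int.floordiv_mul_add_mod r n
    rw [hsr] at hr
    have hml0 := PySem.Int.mod_nonneg l hn
    have hmr := PySem.Int.mod_lt r hn
    rw [hsr, PySem.List.pyRange_one_singleton]
    simp only [List.flatMap_cons, List.flatMap_nil, List.append_nil]
    exact pv_rowchunk F n (PySem.Int.floordiv l n) (PySem.Int.mod l n)
      (PySem.Int.mod r n + 1) l (r + 1) hn hml0 (by omega) (by omega) (by omega)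
  | succ t ih =>
    intro l r h
    set sr := PySem.Int.floordiv l n with hsrdef
    set er := PySem.Int.floordiv r n with herdef
    have hl := PySem.Int.floordiv_mul_add_mod l n
    have hr := PySem.Int.floordiv_mul_add_mod r n
    rw [← hsrdef] at hl
    rw [← herdef] at hr
    have hml0 := PySem.Int.mod_nonneg l hn
    have hmln := PySem.Int.mod_lt l hn
    have hmr0 := PySem.Int.mod_nonneg r hn
    have hmrn := PySem.Int.mod_lt r hn
    have hlt : sr < er := by omega
    have hmul : (sr + 1) * n ≤ er * n :=
      mul_le_mul_of_nonneg_right (by omega) (le_of_lt hn)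
    have hsn : (sr + 1) * n = sr * n + n := by ring
    have h1 : l ≤ (sr + 1) * n := by omega
    have h2 : (sr + 1) * n ≤ r + 1 := by omega
    obtain ⟨hfm, hmm⟩ := pv_decomp n (sr + 1) 0 hn le_rfl hn
    rw [add_zero] at hfm hmm
    rw [PySem.List.pyRange_one_append l ((sr + 1) * n) (r + 1) h1 h2, List.map_append]
    have chunk1 := pv_rowchunk F n sr (PySem.Int.mod l n) n l ((sr + 1) * n)
      hn hml0 le_rfl (by omega) (by omega)
    have ihm := ih ((sr + 1) * n) r (by rw [hfm]; omega)
    rw [hfm, hmm] at ihm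
    rw [chunk1, ihm]
    -- assemble the right-hand side
    rw [PySem.List.pyRange_one_cons (show sr < er + 1 by omega)]
    simp only [List.flatMap_cons, if_neg (show sr ≠ er by omega)]
    have hco : n - 1 + 1 = n := by ring
    rw [hco]
    congr 1
    apply List.flatMap_congr
    intro row hrow
    rw [PySem.List.mem_pyRange_one] at hrow
    have hne : ¬ (row = sr) := by omega
    rw [if_neg hne, ite_self]

-- A's loop body written as a single append of the row/column maximum
theorem pv_A_step (n : Int) :
    (fun (result : List Int) (number : Int) =>
      let row := PySem.Int.floordiv number n + 1
      let col := PySem.Int.mod number n + 1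
      if row ≥ col then result ++ [row] else result ++ [col])
    = fun result number =>
        result ++ [max (PySem.Int.floordiv number n) (PySem.Int.mod number n) + 1] := by
  funext result number
  simp only []
  split_ifs with hge
  · rw [max_eq_left (by omega)]
  · rw [max_eq_right (by omega)]

theorem solution_eq_map (n l r : Int) :
    solution n l r
      = (PySem.List.pyRange l (r + 1) 1).map
          (fun k => max (PySem.Int.floordiv k n) (PySem.Int.mod k n) + 1) := by
  unfold solution
  rw [pv_A_step]
  rw [PySem.List.foldl_append_singleton_eq_map]
  simp

theorem solution_alt_eq_flatMap (n l r : Int) :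
    solution_alt n l r
      = (PySem.List.pyRange (PySem.Int.floordiv l n) (PySem.Int.floordiv r n + 1) 1).flatMap
          (fun row =>
            (PySem.List.pyRange
                (if row = PySem.Int.floordiv l n then PySem.Int.mod l n else 0)
                ((if row = PySem.Int.floordiv r n then PySem.Int.mod r n else n - 1) + 1) 1).map
              (fun col => max row col + 1)) := by
  unfold solution_alt
  simp only [PySem.List.foldl_append_singleton_eq_map]
  rw [PySem.List.foldl_append_eq_flatMap]
  simp

-- ===== VERDICT (by name: the statement is the Claim_ definition above) =====
theorem solution_spec : Claim_equal_solution := by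
  unfold Claim_equal_solution
  intro n l r _hdom hpre
  have hn : 0 < n := hpre
  unfold Spec_solution
  rw [solution_eq_map, solution_alt_eq_flatMap]
  by_cases hle : PySem.Int.floordiv l n ≤ PySem.Int.floordiv r n
  · have := pv_split (fun row col => max row col + 1) n hn
      (PySem.Int.floordiv r n - PySem.Int.floordiv l n).toNat l r (by omega)
    exact this
  · -- empty slice: left > right, both traversals produce []
    have hmono : r < l := by
      by_contra hc
      refine hle ?_
      rw [PySem.Int.floordiv_eq_ediv_of_pos hn, PySem.Int.floordiv_eq_ediv_of_pos hn]
      exact Int.ediv_le_ediv hn (by omega)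
    rw [PySem.List.pyRange_one_eq_nil (by omega),
        PySem.List.pyRange_one_eq_nil (by omega)]
    simp
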